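-- pv_equiv track=rewrite | github.com/kitao/pyxel | python/pyxel/gems/bgm_generator.py | _select_default_length
-- ===== SOURCE A (Python) =====
-- from typing import Dict, List, Optional, Sequence, Tuple
--
-- def _length_units_to_tokens(units: int) -> List[str]:
--     table = [
--         (16, "1"),
--         (12, "2."),
--         (8, "2"),
--         (6, "4."),
--         (4, "4"),
--         (3, "8."),
--         (2, "8"),
--         (1, "16"),
--     ]
--     tokens: List[str] = []
--     remaining = units
--     for u, token in table:
--         while remaining >= u:
--             tokens.append(token)
--             remaining -= u
--         if remaining == 0:
--             break
--     return tokens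
--
-- def _select_default_length(notes: List[Optional[object]]) -> str:
--     len_counts = {"1": 0, "2": 0, "4": 0, "8": 0, "16": 0}
--     idx = 0
--     while idx < len(notes):
--         note_len = notes[idx]
--         if note_len is None:
--             idx += 1
--             continue
--         length = 1
--         j = idx + 1
--         while j < len(notes) and notes[j] is None:
--             length += 1
--             j += 1
--         idx = j
--         tokens = _length_units_to_tokens(length)
--         if tokens:
--             head = tokens[0]
--             if head in len_counts:
--                 len_counts[head] += 1
--     return max(len_counts.items(), key=lambda kv: (kv[1], int(kv[0])))[0]
-- ===== SOURCE B (Python) =====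
-- def _select_default_length(notes):
--     # One reverse pass: count each trailing None run, classify the run length
--     # with closed-form thresholds instead of the greedy token decomposition.
--     counts = {"1": 0, "2": 0, "4": 0, "8": 0, "16": 0}
--     run = 0
--     for note in reversed(notes):
--         if note is None:
--             run += 1
--         else:
--             length = run + 1
--             if length >= 16:
--                 counts["1"] += 1
--             elif 8 <= length <= 11:
--                 counts["2"] += 1
--             elif length == 4 or length == 5:
--                 counts["4"] += 1
--             elif length == 2:
--                 counts["8"] += 1
--             elif length == 1:
--                 counts["16"] += 1
--             run = 0
--     return max(counts.items(), key=lambda kv: (kv[1], int(kv[0])))[0]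
-- ===== Notes on version B (the rewrite author's own statement) =====
-- stated objective: simpler
-- what changed: B replaces A's index-based forward scan with nested None-lookahead plus the greedy _length_units_to_tokens decomposition by a single reverse pass that keeps a running None counter and classifies each run length directly with closed-form thresholds.
import Mathlib
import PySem

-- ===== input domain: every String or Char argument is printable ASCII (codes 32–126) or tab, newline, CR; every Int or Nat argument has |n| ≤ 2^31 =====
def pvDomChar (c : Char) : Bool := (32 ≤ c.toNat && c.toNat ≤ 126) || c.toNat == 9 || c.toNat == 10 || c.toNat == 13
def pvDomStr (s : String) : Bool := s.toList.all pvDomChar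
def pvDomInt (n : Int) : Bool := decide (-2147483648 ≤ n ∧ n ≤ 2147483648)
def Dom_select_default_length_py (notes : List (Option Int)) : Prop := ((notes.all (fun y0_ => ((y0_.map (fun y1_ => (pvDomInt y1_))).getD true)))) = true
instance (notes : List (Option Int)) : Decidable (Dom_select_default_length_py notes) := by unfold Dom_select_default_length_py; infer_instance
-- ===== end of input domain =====

-- B replaces A's index-based forward scan + greedy token helper by a single reverse
-- pass with a running None counter and closed-form length thresholds (objective: simpler).

-- ===== PORT A =====
-- _length_units_to_tokens: the inner 'while remaining >= u' loop
-- (the 0 < u conjunct only makes the loop total; every table entry has u > 0)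
def pvRep (remaining u : Int) (token : String) (acc : List String) : List String × Int :=
  if h : u ≤ remaining ∧ 0 < u then pvRep (remaining - u) u token (acc ++ [token])
  else (acc, remaining)
termination_by remaining.toNat
decreasing_by omega

-- the 'for u, token in table' loop with its 'if remaining == 0: break'
def pvLutGo : List (Int × String) → Int → List String → List String
  | [], _, acc => acc
  | (u, t) :: rest, remaining, acc =>
      let p := pvRep remaining u t acc
      if p.2 == 0 then p.1 else pvLutGo rest p.2 p.1

def length_units_to_tokens (units : Int) : List String :=
  pvLutGo [((16 : Int), "1"), (12, "2."), (8, "2"), (6, "4."), (4, "4"),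
           (3, "8."), (2, "8"), (1, "16")] units []

-- inner 'while j < len(notes) and notes[j] is None' scan
def pvScan (notes : List (Option Int)) (j : Nat) (len : Int) : Nat × Int :=
  if h : j < notes.length ∧ notes.getD j none = none then pvScan notes (j + 1) (len + 1)
  else (j, len)
termination_by notes.length - j

theorem pvScan_ge (notes : List (Option Int)) (j : Nat) (len : Int) :
    j ≤ (pvScan notes j len).1 := by
  fun_induction pvScan with
  | case1 j len h ih => omega
  | case2 j len h => simp

-- 'if tokens: head = tokens[0]; if head in len_counts: len_counts[head] += 1'
def pvABump (counts : PySem.Dict String Int) (tokens : List String) : PySem.Dict String Int :=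
  match tokens.head? with
  | none => counts
  | some head =>
      if counts.contains head then counts.insert head (counts.getD head 0 + 1) else counts

-- the outer 'while idx < len(notes)' loop
def pvALoop (notes : List (Option Int)) (idx : Nat) (counts : PySem.Dict String Int) :
    PySem.Dict String Int :=
  if h : idx < notes.length then
    match notes.getD idx none with
    | none => pvALoop notes (idx + 1) counts
    | some _ =>
        let p := pvScan notes (idx + 1) 1
        pvALoop notes p.1 (pvABump counts (length_units_to_tokens p.2))
  else counts
termination_by notes.length - idx
decreasing_by
  · omega
  · have := pvScan_ge notes (idx + 1) 1
    omega

def select_default_length_py (notes : List (Option Int)) : String :=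
  let counts := pvALoop notes 0
    (PySem.Dict.ofList [("1", (0 : Int)), ("2", 0), ("4", 0), ("8", 0), ("16", 0)])
  -- int(kv[0]) on the digit-string keys, ported via PySem.Int.ofStr? (exact: keys are decimal literals)
  match PySem.List.max2? counts.items (fun kv => kv.2) (fun kv => (PySem.Int.ofStr? kv.1).getD 0) with
  | some kv => kv.1
  | none => ""   -- unreachable: the dict always has five items

-- ===== PORT B =====
-- the classification if-chain of Source B
def pvBClass (length : Int) (c : PySem.Dict String Int) : PySem.Dict String Int :=
  if 16 ≤ length then c.insert "1" (c.getD "1" 0 + 1)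
  else if 8 ≤ length ∧ length ≤ 11 then c.insert "2" (c.getD "2" 0 + 1)
  else if length = 4 ∨ length = 5 then c.insert "4" (c.getD "4" 0 + 1)
  else if length = 2 then c.insert "8" (c.getD "8" 0 + 1)
  else if length = 1 then c.insert "16" (c.getD "16" 0 + 1)
  else c

-- body of 'for note in reversed(notes)', state = (run, counts)
def pvBStep (s : Int × PySem.Dict String Int) (note : Option Int) :
    Int × PySem.Dict String Int :=
  match note with
  | none => (s.1 + 1, s.2)
  | some _ => (0, pvBClass (s.1 + 1) s.2)

def select_default_length_py_alt (notes : List (Option Int)) : String :=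
  let p := notes.reverse.foldl pvBStep
    ((0 : Int), PySem.Dict.ofList [("1", (0 : Int)), ("2", 0), ("4", 0), ("8", 0), ("16", 0)])
  match PySem.List.max2? p.2.items (fun kv => kv.2) (fun kv => (PySem.Int.ofStr? kv.1).getD 0) with
  | some kv => kv.1
  | none => ""

-- ===== PRECONDITION & SPEC =====
def Spec_select_default_length_py (notes : List (Option Int)) (out : String) : Prop := out = select_default_length_py_alt notes
instance (notes : List (Option Int)) (out : String) : Decidable (Spec_select_default_length_py notes out) := by unfold Spec_select_default_length_py; infer_instance

-- ===== CLAIM (what is proved, stated in full; the proofs are below) =====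
def Claim_equal_select_default_length_py : Prop := ∀ (notes : List (Option Int)), Dom_select_default_length_py notes → Spec_select_default_length_py notes (select_default_length_py notes)

-- ===== LEMMAS AND PROOFS =====

-- the five-key counts dict as a shape
def mkD (a b c d e : Int) : PySem.Dict String Int :=
  PySem.Dict.ofList [("1", a), ("2", b), ("4", c), ("8", d), ("16", e)]

theorem items_mkD (a b c d e : Int) :
    (mkD a b c d e).items = [("1", a), ("2", b), ("4", c), ("8", d), ("16", e)] := by
  simp [mkD, PySem.Dict.ofList, PySem.Dict.update, PySem.Dict.insert, PySem.Dict.empty,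
    PySem.Dict.contains]

theorem mkD_inj {a b c d e a' b' c' d' e' : Int} :
    mkD a b c d e = mkD a' b' c' d' e' ↔ (a = a' ∧ b = b' ∧ c = c' ∧ d = d' ∧ e = e') := by
  rw [PySem.Dict.ext_iff, items_mkD, items_mkD]; simp

theorem getD1 (a b c d e : Int) : (mkD a b c d e).getD "1" 0 = a := by
  simp [PySem.Dict.getD, PySem.Dict.get?, items_mkD]
theorem getD2 (a b c d e : Int) : (mkD a b c d e).getD "2" 0 = b := by
  simp [PySem.Dict.getD, PySem.Dict.get?, items_mkD]
theorem getD4 (a b c d e : Int) : (mkD a b c d e).getD "4" 0 = c := by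
  simp [PySem.Dict.getD, PySem.Dict.get?, items_mkD]
theorem getD8 (a b c d e : Int) : (mkD a b c d e).getD "8" 0 = d := by
  simp [PySem.Dict.getD, PySem.Dict.get?, items_mkD]
theorem getD16 (a b c d e : Int) : (mkD a b c d e).getD "16" 0 = e := by
  simp [PySem.Dict.getD, PySem.Dict.get?, items_mkD]

theorem ins1 (a b c d e v : Int) : (mkD a b c d e).insert "1" v = mkD v b c d e := by
  apply PySem.Dict.ext; simp [PySem.Dict.insert, PySem.Dict.contains, items_mkD]
theorem ins2 (a b c d e v : Int) : (mkD a b c d e).insert "2" v = mkD a v c d e := by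
  apply PySem.Dict.ext; simp [PySem.Dict.insert, PySem.Dict.contains, items_mkD]
theorem ins4 (a b c d e v : Int) : (mkD a b c d e).insert "4" v = mkD a b v d e := by
  apply PySem.Dict.ext; simp [PySem.Dict.insert, PySem.Dict.contains, items_mkD]
theorem ins8 (a b c d e v : Int) : (mkD a b c d e).insert "8" v = mkD a b c v e := by
  apply PySem.Dict.ext; simp [PySem.Dict.insert, PySem.Dict.contains, items_mkD]
theorem ins16 (a b c d e v : Int) : (mkD a b c d e).insert "16" v = mkD a b c d v := by
  apply PySem.Dict.ext; simp [PySem.Dict.insert, PySem.Dict.contains, items_mkD]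

theorem cont1 (a b c d e : Int) : (mkD a b c d e).contains "1" = true := by
  simp [PySem.Dict.contains, items_mkD]
theorem cont2 (a b c d e : Int) : (mkD a b c d e).contains "2" = true := by
  simp [PySem.Dict.contains, items_mkD]
theorem cont4 (a b c d e : Int) : (mkD a b c d e).contains "4" = true := by
  simp [PySem.Dict.contains, items_mkD]
theorem cont8 (a b c d e : Int) : (mkD a b c d e).contains "8" = true := by
  simp [PySem.Dict.contains, items_mkD]
theorem cont16 (a b c d e : Int) : (mkD a b c d e).contains "16" = true := by
  simp [PySem.Dict.contains, items_mkD]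
theorem contD2 (a b c d e : Int) : (mkD a b c d e).contains "2." = false := by
  simp [PySem.Dict.contains, items_mkD]
theorem contD4 (a b c d e : Int) : (mkD a b c d e).contains "4." = false := by
  simp [PySem.Dict.contains, items_mkD]
theorem contD8 (a b c d e : Int) : (mkD a b c d e).contains "8." = false := by
  simp [PySem.Dict.contains, items_mkD]

-- number of leading Nones
def leadN : List (Option Int) → Nat
  | [] => 0
  | some _ :: _ => 0
  | none :: t => leadN t + 1

-- the run length introduced by each non-None note
def runs : List (Option Int) → List Int
  | [] => []
  | none :: t => runs t
  | some _ :: t => (1 + (leadN t : Int)) :: runs t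

def i1 (L : Int) : Int := if 16 ≤ L then 1 else 0
def i2 (L : Int) : Int := if 8 ≤ L ∧ L ≤ 11 then 1 else 0
def i4 (L : Int) : Int := if L = 4 ∨ L = 5 then 1 else 0
def i8 (L : Int) : Int := if L = 2 then 1 else 0
def i16 (L : Int) : Int := if L = 1 then 1 else 0

def S1 (l : List (Option Int)) : Int := ((runs l).map i1).sum
def S2 (l : List (Option Int)) : Int := ((runs l).map i2).sum
def S4 (l : List (Option Int)) : Int := ((runs l).map i4).sum
def S8 (l : List (Option Int)) : Int := ((runs l).map i8).sum
def S16 (l : List (Option Int)) : Int := ((runs l).map i16).sum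

theorem pvRep_ne_nil (r u : Int) (t : String) (acc : List String) (h : acc ≠ []) :
    (pvRep r u t acc).1 ≠ [] := by
  fun_induction pvRep with
  | case1 r acc hc ih => exact ih (by simp)
  | case2 r acc hc => simpa using h

theorem pvRep_head (r u : Int) (t : String) (acc : List String) (h : acc ≠ []) :
    ((pvRep r u t acc).1).head? = acc.head? := by
  fun_induction pvRep with
  | case1 r acc hc ih =>
      rw [ih (by simp)]
      cases acc with
      | nil => exact absurd rfl h
      | cons x xs => rfl
  | case2 r acc hc => rfl

theorem pvLutGo_head (tbl : List (Int × String)) (r : Int) (acc : List String) (h : acc ≠ []) :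
    (pvLutGo tbl r acc).head? = acc.head? := by
  induction tbl generalizing r acc with
  | nil => rfl
  | cons p rest ih =>
      obtain ⟨u, t⟩ := p
      simp only [pvLutGo]
      split
      · exact pvRep_head r u t acc h
      · rw [ih _ _ (pvRep_ne_nil r u t acc h), pvRep_head r u t acc h]

theorem pvLutGo_cons (u : Int) (t : String) (tbl : List (Int × String)) (r : Int)
    (acc : List String) :
    pvLutGo ((u, t) :: tbl) r acc =
      (if (pvRep r u t acc).2 == 0 then (pvRep r u t acc).1
       else pvLutGo tbl (pvRep r u t acc).2 (pvRep r u t acc).1) := rfl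

theorem pvLutGo_head' (u : Int) (t : String) (tbl : List (Int × String)) (r : Int)
    (acc : List String) (h : (pvRep r u t acc).1 ≠ []) :
    (pvLutGo ((u, t) :: tbl) r acc).head? = ((pvRep r u t acc).1).head? := by
  rw [pvLutGo_cons]
  split
  · rfl
  · exact pvLutGo_head tbl _ _ h

theorem beq_zero_false (r : Int) (h : 1 ≤ r) : (r == 0) = false := by
  simp; omega

theorem lutgo_skip (u : Int) (t : String) (tbl : List (Int × String)) (r : Int)
    (acc : List String) (hu : ¬ u ≤ r) (hr : (r == 0) = false) :
    pvLutGo ((u, t) :: tbl) r acc = pvLutGo tbl r acc := by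
  have hrep : pvRep r u t acc = (acc, r) := by
    rw [pvRep, dif_neg (by tauto)]
  rw [pvLutGo_cons, hrep]
  simp [hr]

theorem lutgo_hit (u : Int) (t : String) (tbl : List (Int × String)) (r : Int)
    (hu : u ≤ r) (hupos : 0 < u) :
    (pvLutGo ((u, t) :: tbl) r []).head? = some t := by
  have hrep : pvRep r u t [] = pvRep (r - u) u t [t] := by
    rw [pvRep, dif_pos ⟨hu, hupos⟩]; simp
  have hne : (pvRep (r - u) u t [t]).1 ≠ [] := pvRep_ne_nil _ _ _ _ (by simp)
  rw [pvLutGo_head' _ _ _ _ _ (by rw [hrep]; exact hne), hrep,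
    pvRep_head _ _ _ _ (by simp)]
  rfl

theorem lut_head (L : Int) (h : 1 ≤ L) :
    (length_units_to_tokens L).head? = some
      (if 16 ≤ L then "1" else if 12 ≤ L then "2." else if 8 ≤ L then "2"
       else if 6 ≤ L then "4." else if 4 ≤ L then "4" else if 3 ≤ L then "8."
       else if 2 ≤ L then "8" else "16") := by
  have hz := beq_zero_false L h
  unfold length_units_to_tokens
  by_cases c1 : 16 ≤ L
  · rw [if_pos c1]; exact lutgo_hit _ _ _ _ c1 (by norm_num)
  · rw [if_neg c1, lutgo_skip _ _ _ _ _ c1 hz]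
    by_cases c2 : 12 ≤ L
    · rw [if_pos c2]; exact lutgo_hit _ _ _ _ c2 (by norm_num)
    · rw [if_neg c2, lutgo_skip _ _ _ _ _ c2 hz]
      by_cases c3 : 8 ≤ L
      · rw [if_pos c3]; exact lutgo_hit _ _ _ _ c3 (by norm_num)
      · rw [if_neg c3, lutgo_skip _ _ _ _ _ c3 hz]
        by_cases c4 : 6 ≤ L
        · rw [if_pos c4]; exact lutgo_hit _ _ _ _ c4 (by norm_num)
        · rw [if_neg c4, lutgo_skip _ _ _ _ _ c4 hz]
          by_cases c5 : 4 ≤ L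
          · rw [if_pos c5]; exact lutgo_hit _ _ _ _ c5 (by norm_num)
          · rw [if_neg c5, lutgo_skip _ _ _ _ _ c5 hz]
            by_cases c6 : 3 ≤ L
            · rw [if_pos c6]; exact lutgo_hit _ _ _ _ c6 (by norm_num)
            · rw [if_neg c6, lutgo_skip _ _ _ _ _ c6 hz]
              by_cases c7 : 2 ≤ L
              · rw [if_pos c7]; exact lutgo_hit _ _ _ _ c7 (by norm_num)
              · rw [if_neg c7, lutgo_skip _ _ _ _ _ c7 hz]
                exact lutgo_hit _ _ _ _ h (by norm_num)

theorem stepA (L a b c d e : Int) (h : 1 ≤ L) :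
    pvABump (mkD a b c d e) (length_units_to_tokens L) =
      mkD (a + i1 L) (b + i2 L) (c + i4 L) (d + i8 L) (e + i16 L) := by
  simp only [pvABump, lut_head L h]
  by_cases c1 : 16 ≤ L
  · rw [if_pos c1]; simp [cont1, getD1, ins1]
    rw [mkD_inj]; simp only [i1, i2, i4, i8, i16]; split_ifs <;> omega
  · rw [if_neg c1]
    by_cases c2 : 12 ≤ L
    · rw [if_pos c2]; simp [contD2]
      rw [mkD_inj]; simp only [i1, i2, i4, i8, i16]; split_ifs <;> omega
    · rw [if_neg c2]
      by_cases c3 : 8 ≤ L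
      · rw [if_pos c3]; simp [cont2, getD2, ins2]
        rw [mkD_inj]; simp only [i1, i2, i4, i8, i16]; split_ifs <;> omega
      · rw [if_neg c3]
        by_cases c4 : 6 ≤ L
        · rw [if_pos c4]; simp [contD4]
          rw [mkD_inj]; simp only [i1, i2, i4, i8, i16]; split_ifs <;> omega
        · rw [if_neg c4]
          by_cases c5 : 4 ≤ L
          · rw [if_pos c5]; simp [cont4, getD4, ins4]
            rw [mkD_inj]; simp only [i1, i2, i4, i8, i16]; split_ifs <;> omega
          · rw [if_neg c5]
            by_cases c6 : 3 ≤ L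
            · rw [if_pos c6]; simp [contD8]
              rw [mkD_inj]; simp only [i1, i2, i4, i8, i16]; split_ifs <;> omega
            · rw [if_neg c6]
              by_cases c7 : 2 ≤ L
              · rw [if_pos c7]; simp [cont8, getD8, ins8]
                rw [mkD_inj]; simp only [i1, i2, i4, i8, i16]; split_ifs <;> omega
              · rw [if_neg c7]; simp [cont16, getD16, ins16]
                rw [mkD_inj]; simp only [i1, i2, i4, i8, i16]; split_ifs <;> omega

theorem stepB (L a b c d e : Int) :
    pvBClass L (mkD a b c d e) =
      mkD (a + i1 L) (b + i2 L) (c + i4 L) (d + i8 L) (e + i16 L) := by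
  unfold pvBClass
  split_ifs with hA hB hC hD hE <;>
    (try simp only [getD1, getD2, getD4, getD8, getD16, ins1, ins2, ins4, ins8, ins16]) <;>
    rw [mkD_inj] <;> simp only [i1, i2, i4, i8, i16] <;> split_ifs <;> omega

theorem pvScan_eq (notes : List (Option Int)) (j : Nat) (len : Int) :
    pvScan notes j len =
      (j + leadN (notes.drop j), len + (leadN (notes.drop j) : Int)) := by
  fun_induction pvScan with
  | case1 j len h ih =>
      obtain ⟨hj, hnone⟩ := h
      have hget : notes[j] = none := by
        rw [← List.getD_eq_getElem notes none hj]; exact hnone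
      have hd : notes.drop j = none :: notes.drop (j + 1) := by
        rw [List.drop_eq_getElem_cons hj, hget]
      rw [ih, hd]
      simp only [leadN, Prod.mk.injEq]
      constructor <;> push_cast <;> omega
  | case2 j len h =>
      rcases Nat.lt_or_ge j notes.length with hj | hj
      · have hne : notes.getD j none ≠ none := fun hc => h ⟨hj, hc⟩
        have hget : notes[j] ≠ none := by
          rw [← List.getD_eq_getElem notes none hj]; exact hne
        obtain ⟨v, hv⟩ := Option.ne_none_iff_exists'.mp hget
        have hd : notes.drop j = some v :: notes.drop (j + 1) := by
          rw [List.drop_eq_getElem_cons hj, hv]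
        rw [hd]; simp [leadN]
      · have hd : notes.drop j = [] := List.drop_eq_nil_of_le hj
        rw [hd]; simp [leadN]

theorem runs_drop_leadN (t : List (Option Int)) : runs (t.drop (leadN t)) = runs t := by
  induction t with
  | nil => rfl
  | cons x t ih =>
      cases x with
      | some v => simp [leadN, runs]
      | none => simpa [leadN, runs, List.drop_succ_cons] using ih

theorem S_none (t : List (Option Int)) :
    S1 (none :: t) = S1 t ∧ S2 (none :: t) = S2 t ∧ S4 (none :: t) = S4 t ∧
    S8 (none :: t) = S8 t ∧ S16 (none :: t) = S16 t := by
  simp [S1, S2, S4, S8, S16, runs]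

theorem S_some (v : Int) (t : List (Option Int)) :
    S1 (some v :: t) = i1 (1 + (leadN t : Int)) + S1 t ∧
    S2 (some v :: t) = i2 (1 + (leadN t : Int)) + S2 t ∧
    S4 (some v :: t) = i4 (1 + (leadN t : Int)) + S4 t ∧
    S8 (some v :: t) = i8 (1 + (leadN t : Int)) + S8 t ∧
    S16 (some v :: t) = i16 (1 + (leadN t : Int)) + S16 t := by
  simp [S1, S2, S4, S8, S16, runs]

theorem S_drop_leadN (t : List (Option Int)) :
    S1 (t.drop (leadN t)) = S1 t ∧ S2 (t.drop (leadN t)) = S2 t ∧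
    S4 (t.drop (leadN t)) = S4 t ∧ S8 (t.drop (leadN t)) = S8 t ∧
    S16 (t.drop (leadN t)) = S16 t := by
  simp [S1, S2, S4, S8, S16, runs_drop_leadN]

theorem pvALoop_eq (notes : List (Option Int)) :
    ∀ (n idx : Nat) (a b c d e : Int), notes.length - idx ≤ n →
      pvALoop notes idx (mkD a b c d e) =
        mkD (a + S1 (notes.drop idx)) (b + S2 (notes.drop idx)) (c + S4 (notes.drop idx))
            (d + S8 (notes.drop idx)) (e + S16 (notes.drop idx)) := by
  intro n
  induction n with
  | zero =>
      intro idx a b c d e hn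
      have hidx : notes.length ≤ idx := by omega
      rw [pvALoop, dif_neg (by omega), List.drop_eq_nil_of_le hidx]
      rw [mkD_inj]; simp [S1, S2, S4, S8, S16, runs]
  | succ n ih =>
      intro idx a b c d e hn
      by_cases hidx : idx < notes.length
      · rw [pvALoop, dif_pos hidx]
        cases hx : notes[idx] with
        | none =>
            have hg : notes.getD idx none = none := by
              rw [List.getD_eq_getElem notes none hidx, hx]
            simp only [hg]
            rw [ih (idx + 1) a b c d e (by omega)]
            have hd : notes.drop idx = none :: notes.drop (idx + 1) := by
              rw [List.drop_eq_getElem_cons hidx, hx]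
            rw [hd, mkD_inj]
            have := S_none (notes.drop (idx + 1))
            omega
        | some v =>
            have hg : notes.getD idx none = some v := by
              rw [List.getD_eq_getElem notes none hidx, hx]
            simp only [hg, pvScan_eq]
            have hL : (1 : Int) ≤ 1 + (leadN (notes.drop (idx + 1)) : Int) := by omega
            rw [stepA _ _ _ _ _ _ hL]
            rw [ih (idx + 1 + leadN (notes.drop (idx + 1)))
              (a + i1 (1 + (leadN (notes.drop (idx + 1)) : Int)))
              (b + i2 (1 + (leadN (notes.drop (idx + 1)) : Int)))
              (c + i4 (1 + (leadN (notes.drop (idx + 1)) : Int)))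
              (d + i8 (1 + (leadN (notes.drop (idx + 1)) : Int)))
              (e + i16 (1 + (leadN (notes.drop (idx + 1)) : Int))) (by omega)]
            have hdd : notes.drop (idx + 1 + leadN (notes.drop (idx + 1))) =
                (notes.drop (idx + 1)).drop (leadN (notes.drop (idx + 1))) := by
              rw [List.drop_drop]
            have hd : notes.drop idx = some v :: notes.drop (idx + 1) := by
              rw [List.drop_eq_getElem_cons hidx, hx]
            rw [hdd, hd, mkD_inj]
            have h1 := S_drop_leadN (notes.drop (idx + 1))
            have h2 := S_some v (notes.drop (idx + 1))
            omega
      · rw [pvALoop, dif_neg hidx, List.drop_eq_nil_of_le (by omega), mkD_inj]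
        simp [S1, S2, S4, S8, S16, runs]

theorem pvB_foldr (l : List (Option Int)) :
    ∀ (a b c d e : Int),
      l.foldr (fun x s => pvBStep s x) (0, mkD a b c d e) =
        ((leadN l : Int), mkD (a + S1 l) (b + S2 l) (c + S4 l) (d + S8 l) (e + S16 l)) := by
  induction l with
  | nil =>
      intro a b c d e
      simp [leadN, S1, S2, S4, S8, S16, runs]
  | cons x t ih =>
      intro a b c d e
      rw [List.foldr_cons, ih]
      cases x with
      | none =>
          simp only [pvBStep, leadN, Prod.mk.injEq]
          constructor
          · push_cast; ring
          · rw [mkD_inj]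
            have := S_none t
            omega
      | some v =>
          simp only [pvBStep, leadN, Prod.mk.injEq]
          refine ⟨rfl, ?_⟩
          have hc : (leadN t : Int) + 1 = 1 + (leadN t : Int) := by omega
          rw [stepB, hc, mkD_inj]
          have := S_some v t
          omega

-- ===== VERDICT (by name: the statement is the Claim_ definition above) =====
theorem select_default_length_py_spec : Claim_equal_select_default_length_py := by
  intro notes _
  unfold Spec_select_default_length_py
  have e1 : pvALoop notes 0 (mkD 0 0 0 0 0) =
      mkD (0 + S1 notes) (0 + S2 notes) (0 + S4 notes) (0 + S8 notes) (0 + S16 notes) := by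
    have := pvALoop_eq notes notes.length 0 0 0 0 0 0 (by omega)
    rwa [List.drop_zero] at this
  have e2 : notes.reverse.foldl pvBStep ((0 : Int), mkD 0 0 0 0 0) =
      ((leadN notes : Int),
        mkD (0 + S1 notes) (0 + S2 notes) (0 + S4 notes) (0 + S8 notes) (0 + S16 notes)) := by
    rw [List.foldl_reverse]
    exact pvB_foldr notes 0 0 0 0 0
  simp only [select_default_length_py, select_default_length_py_alt,
    show PySem.Dict.ofList [("1", (0 : Int)), ("2", 0), ("4", 0), ("8", 0), ("16", 0)] =
      mkD 0 0 0 0 0 from rfl, e1, e2]
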